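-- pv_equiv track=rewrite | github.com/RemiTsai46/Railway-Signboard-Generator | resources/functions/calculations.py | rowLen
-- ===== SOURCE A (Python) =====
-- def rowLen(p:int,boxWidths,lineRange:tuple[int,int],boxGap:int): # p=platformline
--     #var init
--     total = 0
--     addRow = False
--     col = lineRange[1]-lineRange[0]
--
--     total = sum(boxWidths[lineRange[0]:lineRange[1]]) + boxGap*(col-1)
--     if p in range(*lineRange):
--         total -= boxGap
--
--     while boxGap > 0:
--         if total > 122:
--             boxGap -= 1
--             total -= (col-1)
--             if p in range(*lineRange):
--                 total -= 1
--             if boxGap < 1: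
--                 addRow = True
--                 boxGap = 1
--                 break
--         else:
--             break
--
--     if total % 2 == 1:
--         total += 1
--
--     return total,boxGap,addRow
-- ===== SOURCE B (Python) =====
-- def rowLen(p: int, boxWidths, lineRange: tuple[int, int], boxGap: int):
--     a, b = lineRange
--     col = b - a
--     in_line = a <= p < b
--     dec = (col - 1) + (1 if in_line else 0)
--     total = sum(boxWidths[a:b]) + boxGap * (col - 1) - (boxGap if in_line else 0)
--     addRow = False
--     if boxGap > 0 and total > 122:
--         if dec > 0:
--             k = -((122 - total) // dec)  # ceil((total - 122) / dec): steps needed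
--             if k < boxGap:
--                 total -= k * dec
--                 boxGap -= k
--             else:
--                 total -= boxGap * dec
--                 boxGap = 1
--                 addRow = True
--         else:
--             total -= boxGap * dec
--             boxGap = 1
--             addRow = True
--     if total % 2 == 1:
--         total += 1
--     return total, boxGap, addRow
-- ===== Notes on version B (the rewrite author's own statement) =====
-- stated objective: alternative
-- what changed: The unit-decrement while loop over boxGap is replaced by closed-form arithmetic: the number of needed gap decrements is computed by one ceiling division and applied at once.
import Mathlib
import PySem

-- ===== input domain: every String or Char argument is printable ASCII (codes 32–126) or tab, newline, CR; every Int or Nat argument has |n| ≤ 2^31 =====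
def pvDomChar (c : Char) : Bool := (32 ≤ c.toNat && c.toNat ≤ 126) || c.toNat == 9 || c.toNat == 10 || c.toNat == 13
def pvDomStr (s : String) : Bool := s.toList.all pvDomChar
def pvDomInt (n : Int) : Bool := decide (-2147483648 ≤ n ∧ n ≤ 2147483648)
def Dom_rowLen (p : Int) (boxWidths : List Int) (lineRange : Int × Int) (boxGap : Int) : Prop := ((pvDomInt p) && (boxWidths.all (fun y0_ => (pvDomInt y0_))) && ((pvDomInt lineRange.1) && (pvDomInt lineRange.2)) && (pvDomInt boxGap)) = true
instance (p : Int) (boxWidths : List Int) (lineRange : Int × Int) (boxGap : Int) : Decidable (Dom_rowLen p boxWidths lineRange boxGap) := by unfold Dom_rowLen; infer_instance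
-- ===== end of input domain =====

-- B replaces A's unit-decrement while loop by one ceiling division applied at once (objective: alternative).

-- ===== PORT A =====
-- A's while loop: each iteration with total > 122 decrements boxGap by 1 and total by
-- dec = (col-1) + (1 if p in range else 0); terminates by boxGap reaching 0.
def rowLenWhile (dec : Int) (total boxGap : Int) : Int × Int × Bool :=
  if boxGap > 0 then
    if total > 122 then
      if boxGap - 1 < 1 then (total - dec, 1, true)
      else rowLenWhile dec (total - dec) (boxGap - 1)
    else (total, boxGap, false)
  else (total, boxGap, false)
termination_by boxGap.toNat
decreasing_by omega

def rowLen (p : Int) (boxWidths : List Int) (lineRange : Int × Int) (boxGap : Int) : Int × Int × Bool :=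
  let col := lineRange.2 - lineRange.1
  let total0 := (PySem.List.slice boxWidths (some lineRange.1) (some lineRange.2)).sum + boxGap * (col - 1)
  let inLine := lineRange.1 ≤ p ∧ p < lineRange.2   -- p in range(*lineRange)
  let total1 := if inLine then total0 - boxGap else total0
  let r := rowLenWhile ((col - 1) + (if inLine then 1 else 0)) total1 boxGap
  let total2 := if PySem.Int.mod r.1 2 = 1 then r.1 + 1 else r.1
  (total2, r.2.1, r.2.2)

-- ===== PORT B =====
def rowLen_alt (p : Int) (boxWidths : List Int) (lineRange : Int × Int) (boxGap : Int) : Int × Int × Bool :=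
  let a := lineRange.1
  let b := lineRange.2
  let col := b - a
  let inLine := a ≤ p ∧ p < b
  let dec := (col - 1) + (if inLine then 1 else 0)
  let total0 := (PySem.List.slice boxWidths (some a) (some b)).sum + boxGap * (col - 1)
                  - (if inLine then boxGap else 0)
  let r : Int × Int × Bool :=
    if boxGap > 0 ∧ total0 > 122 then
      if dec > 0 then
        let k := -(PySem.Int.floordiv (122 - total0) dec)  -- ceil((total0-122)/dec)
        if k < boxGap then (total0 - k * dec, boxGap - k, false)
        else (total0 - boxGap * dec, 1, true)
      else (total0 - boxGap * dec, 1, true)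
    else (total0, boxGap, false)
  let total := if PySem.Int.mod r.1 2 = 1 then r.1 + 1 else r.1
  (total, r.2.1, r.2.2)

-- ===== PRECONDITION & SPEC =====
def Spec_rowLen (p : Int) (boxWidths : List Int) (lineRange : Int × Int) (boxGap : Int) (out : Int × Int × Bool) : Prop := out = rowLen_alt p boxWidths lineRange boxGap
instance (p : Int) (boxWidths : List Int) (lineRange : Int × Int) (boxGap : Int) (out : Int × Int × Bool) : Decidable (Spec_rowLen p boxWidths lineRange boxGap out) := by unfold Spec_rowLen; infer_instance

-- ===== CLAIM (what is proved, stated in full; the proofs are below) =====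
def Claim_equal_rowLen : Prop := ∀ (p : Int) (boxWidths : List Int) (lineRange : Int × Int) (boxGap : Int), Dom_rowLen p boxWidths lineRange boxGap → Spec_rowLen p boxWidths lineRange boxGap (rowLen p boxWidths lineRange boxGap)

-- ===== LEMMAS AND PROOFS =====

-- Closed form of the while loop.
theorem rowLenWhile_closed (dec total boxGap : Int) :
    rowLenWhile dec total boxGap =
      if boxGap > 0 ∧ total > 122 then
        if dec > 0 then
          let k := -(PySem.Int.floordiv (122 - total) dec)
          if k < boxGap then (total - k * dec, boxGap - k, false)
          else (total - boxGap * dec, 1, true)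
        else (total - boxGap * dec, 1, true)
      else (total, boxGap, false) := by
  induction total, boxGap using rowLenWhile.induct (dec := dec) with
  | case1 total boxGap hg ht hlast =>
    -- last iteration: boxGap = 1
    rw [rowLenWhile]
    have hb1 : boxGap = 1 := by omega
    subst hb1
    simp only [hg, ht, hlast, if_pos, and_self]
    by_cases hd : dec > 0
    · have h122 : (122:Int) - total = -(total - 122) := by ring
      rw [if_pos hd, h122]
      set k := -(PySem.Int.floordiv (-(total - 122)) dec) with hk
      have hbr : (k - 1) * dec < total - 122 ∧ total - 122 ≤ k * dec :=
        (PySem.Int.neg_floordiv_neg_eq_iff_of_pos (a := total - 122) (b := dec) (q := k) hd).mp hk.symm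
      have hk1 : ¬ k < 1 := by nlinarith [hbr.2]
      simp only [hk1, ite_false]
      norm_num
    · rw [if_neg hd]; norm_num
  | case2 total boxGap hg ht hlast ih =>
    -- boxGap ≥ 2; one step then the IH's closed form
    rw [rowLenWhile]
    simp only [hg, ht, hlast, ite_false, and_self, if_pos]
    rw [ih]
    have hb2 : 2 ≤ boxGap := by omega
    by_cases hd : dec > 0
    · have h122 : (122:Int) - total = -(total - 122) := by ring
      have h122' : (122:Int) - (total - dec) = -((total - dec) - 122) := by ring
      rw [h122']
      conv_rhs => rw [h122]
      set k := -(PySem.Int.floordiv (-(total - 122)) dec) with hk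
      have hbr : (k - 1) * dec < total - 122 ∧ total - 122 ≤ k * dec :=
        (PySem.Int.neg_floordiv_neg_eq_iff_of_pos (a := total - 122) (b := dec) (q := k) hd).mp hk.symm
      have hk1 : 1 ≤ k := by nlinarith [hbr.2]
      by_cases ht' : total - dec > 122
      · -- still overflowing: k shifts to k - 1
        have hk' : -(PySem.Int.floordiv (-((total - dec) - 122)) dec) = k - 1 := by
          rw [PySem.Int.neg_floordiv_neg_eq_iff_of_pos hd]
          constructor <;> nlinarith [hbr.1, hbr.2]
        simp only [ht', and_true, hd, ite_true, hk']
        have hcond : boxGap - 1 > 0 := by omega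
        rw [if_pos hcond]
        by_cases hlt : k < boxGap
        · rw [if_pos (by omega : k - 1 < boxGap - 1), if_pos hlt]
          rw [show total - dec - (k - 1) * dec = total - k * dec from by ring,
              show boxGap - 1 - (k - 1) = boxGap - k from by ring]
        · rw [if_neg (by omega : ¬ k - 1 < boxGap - 1), if_neg hlt]
          rw [show total - dec - (boxGap - 1) * dec = total - boxGap * dec from by ring]
      · -- done after this step: k = 1
        have hkeq : k = 1 := by
          have : total - 122 ≤ 1 * dec := by omega
          nlinarith [hbr.1, hbr.2]
        rw [if_neg (fun h => ht' h.2), hkeq, if_pos hd,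
          if_pos (by omega : (1:Int) < boxGap)]
        norm_num
    · -- dec ≤ 0: total never drops, the loop drains boxGap
      have ht'' : total - dec > 122 := by omega
      rw [if_pos (⟨by omega, ht''⟩ : boxGap - 1 > 0 ∧ total - dec > 122), if_neg hd, if_neg hd]
      rw [show total - dec - (boxGap - 1) * dec = total - boxGap * dec from by ring]
  | case3 total boxGap hg ht =>
    rw [rowLenWhile, if_pos hg, if_neg ht, if_neg (fun h => ht h.2)]
  | case4 total boxGap hg =>
    rw [rowLenWhile, if_neg hg, if_neg (fun h => hg h.1)]

-- ===== VERDICT (by name: the statement is the Claim_ definition above) =====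
theorem rowLen_spec : Claim_equal_rowLen := by
  intro p boxWidths lineRange boxGap _
  by_cases h : lineRange.1 ≤ p ∧ p < lineRange.2 <;>
    simp [Spec_rowLen, rowLen, rowLen_alt, rowLenWhile_closed, h]
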